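-- pv_equiv track=rewrite | github.com/PhilippCode1/BitgetKiTrading | shared/python/src/shared_py/market_data_quality.py | detect_out_of_order_candles
-- ===== SOURCE A (Python) =====
-- def detect_out_of_order_candles(candles: list[dict]) -> tuple[bool, list[str]]:
--     if not candles:
--         return False, ["candles_missing"]
--     reasons: list[str] = []
--     last_ts: int | None = None
--     for row in candles:
--         ts = int(row.get("ts_ms") or 0)
--         if ts <= 0:
--             continue
--         if last_ts is not None and ts < last_ts:
--             reasons.append("candle_out_of_order")
--         last_ts = ts
--     return len(reasons) == 0, list(dict.fromkeys(reasons))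
-- ===== SOURCE B (Python) =====
-- def detect_out_of_order_candles(candles: list[dict]) -> tuple[bool, list[str]]:
--     if not candles:
--         return False, ["candles_missing"]
--     valid = [ts for row in candles if (ts := int(row.get("ts_ms") or 0)) > 0]
--     ok = valid == sorted(valid)
--     return ok, [] if ok else ["candle_out_of_order"]
-- ===== Notes on version B (the rewrite author's own statement) =====
-- stated objective: alternative
-- what changed: Replaces A's fused stateful loop counting adjacent inversions with a filter pass followed by a sort-based monotonicity test (valid == sorted(valid)); the deduped reasons list collapses to at most one literal element.
import Mathlib
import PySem

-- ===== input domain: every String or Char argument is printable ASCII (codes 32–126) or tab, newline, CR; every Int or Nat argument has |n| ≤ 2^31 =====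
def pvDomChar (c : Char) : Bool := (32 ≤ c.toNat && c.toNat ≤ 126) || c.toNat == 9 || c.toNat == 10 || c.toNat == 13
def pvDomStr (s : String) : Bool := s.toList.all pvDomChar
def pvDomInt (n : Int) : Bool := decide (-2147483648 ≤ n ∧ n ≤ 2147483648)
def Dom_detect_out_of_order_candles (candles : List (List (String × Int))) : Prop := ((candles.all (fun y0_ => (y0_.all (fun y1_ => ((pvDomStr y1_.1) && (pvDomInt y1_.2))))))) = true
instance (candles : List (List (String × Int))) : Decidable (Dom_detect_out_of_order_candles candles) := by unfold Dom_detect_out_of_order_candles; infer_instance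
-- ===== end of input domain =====

-- B replaces A's fused inversion-counting loop by a filter pass plus a sort-based
-- monotonicity test (valid == sorted(valid)) — objective: alternative algorithm.

-- ===== PORT A =====
-- row.get("ts_ms") or 0: values are ints, so int() is the identity and 'or 0' makes a missing
-- (or zero) value 0 — first-match association-list lookup with default 0.
def detect_out_of_order_candles (candles : List (List (String × Int))) : Bool × List String :=
  if candles = [] then (false, ["candles_missing"])
  else
    let res := candles.foldl (fun (st : List String × Option Int) row =>
      let ts : Int := (List.lookup "ts_ms" row).getD 0
      if ts ≤ 0 then st
      else
        let reasons : List String := match st.2 with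
          | some last => if ts < last then st.1 ++ ["candle_out_of_order"] else st.1
          | none => st.1
        (reasons, some ts)) ([], none)
    (res.1.length == 0, PySem.List.dedup res.1)

-- ===== PORT B =====
def detect_out_of_order_candles_alt (candles : List (List (String × Int))) : Bool × List String :=
  if candles = [] then (false, ["candles_missing"])
  else
    let valid : List Int := candles.filterMap (fun row =>
      let ts : Int := (List.lookup "ts_ms" row).getD 0
      if ts > 0 then some ts else none)
    let ok : Bool := valid == PySem.List.sorted valid (fun x => x) false
    (ok, if ok then [] else ["candle_out_of_order"])

-- ===== PRECONDITION & SPEC =====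
def Spec_detect_out_of_order_candles (candles : List (List (String × Int))) (out : Bool × List String) : Prop := out = detect_out_of_order_candles_alt candles
instance (candles : List (List (String × Int))) (out : Bool × List String) : Decidable (Spec_detect_out_of_order_candles candles out) := by unfold Spec_detect_out_of_order_candles; infer_instance

-- ===== CLAIM (what is proved, stated in full; the proofs are below) =====
def Claim_equal_detect_out_of_order_candles : Prop := ∀ (candles : List (List (String × Int))), Dom_detect_out_of_order_candles candles → Spec_detect_out_of_order_candles candles (detect_out_of_order_candles candles)

-- ===== LEMMAS AND PROOFS =====

-- A's loop step, restricted to the valid timestamps it actually processes.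
def stepA (st : List String × Option Int) (ts : Int) : List String × Option Int :=
  let reasons : List String := match st.2 with
    | some last => if ts < last then st.1 ++ ["candle_out_of_order"] else st.1
    | none => st.1
  (reasons, some ts)

-- Number of adjacent inversions A counts, starting from an optional previous timestamp.
def cnt : Option Int → List Int → Nat
  | _, [] => 0
  | none, t :: ts => cnt (some t) ts
  | some l, t :: ts => (if t < l then 1 else 0) + cnt (some t) ts

-- A's fold over all rows equals the fold of stepA over the filtered valid timestamps.
theorem foldA_filter (candles : List (List (String × Int))) (st : List String × Option Int) :
    candles.foldl (fun st row =>
      let ts : Int := (List.lookup "ts_ms" row).getD 0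
      if ts ≤ 0 then st
      else
        let reasons : List String := match st.2 with
          | some last => if ts < last then st.1 ++ ["candle_out_of_order"] else st.1
          | none => st.1
        (reasons, some ts)) st
    = (candles.filterMap (fun row =>
        let ts : Int := (List.lookup "ts_ms" row).getD 0
        if ts > 0 then some ts else none)).foldl stepA st := by
  induction candles generalizing st with
  | nil => rfl
  | cons row rest ih =>
    simp only [List.foldl_cons, List.filterMap_cons]
    by_cases h : (List.lookup "ts_ms" row).getD 0 ≤ 0
    · simp only [if_pos h, if_neg (by omega : ¬ (List.lookup "ts_ms" row).getD 0 > 0)]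
      exact ih st
    · simp only [if_neg h, if_pos (by omega : (List.lookup "ts_ms" row).getD 0 > 0), List.foldl_cons]
      exact ih _

-- The reasons component of the fold is acc followed by cnt copies of the single message.
theorem foldA_reasons (L : List Int) (acc : List String) (last : Option Int) :
    (L.foldl stepA (acc, last)).1 = acc ++ List.replicate (cnt last L) "candle_out_of_order" := by
  induction L generalizing acc last with
  | nil => simp [cnt.eq_1]
  | cons t ts ih =>
    cases last with
    | none => simpa [stepA, cnt] using ih acc (some t)
    | some l =>
      simp only [List.foldl_cons, stepA, cnt]
      by_cases h : t < l
      · rw [if_pos h, if_pos h, ih, Nat.add_comm, List.replicate_succ]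
        simp
      · rw [if_neg h, if_neg h, ih]
        simp

-- Pairwise ≤ on a two-headed list splits into the head relation and the tail.
theorem pairwise_le_cons_cons (l t : Int) (rest : List Int) :
    (l :: t :: rest).Pairwise (· ≤ ·) ↔ l ≤ t ∧ (t :: rest).Pairwise (· ≤ ·) := by
  constructor
  · intro h
    rcases List.pairwise_cons.1 h with ⟨hall, htail⟩
    exact ⟨hall t (List.mem_cons_self ..), htail⟩
  · rintro ⟨hlt, htail⟩
    refine List.pairwise_cons.2 ⟨?_, htail⟩
    intro x hx
    rcases List.mem_cons.1 hx with rfl | hx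
    · exact hlt
    · exact le_trans hlt (List.rel_of_pairwise_cons htail hx)

-- cnt from a previous element l is zero iff l :: ts is non-decreasing.
theorem cnt_some_eq_zero_iff (l : Int) (ts : List Int) :
    (cnt (some l) ts = 0) ↔ (l :: ts).Pairwise (· ≤ ·) := by
  induction ts generalizing l with
  | nil => simp [cnt]
  | cons t rest ih =>
    rw [pairwise_le_cons_cons]
    simp only [cnt]
    constructor
    · intro h
      have h1 : ¬ t < l := by by_contra hc; simp [hc] at h
      have h2 : cnt (some t) rest = 0 := by omega
      exact ⟨by omega, (ih t).1 h2⟩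
    · rintro ⟨h1, h2⟩
      have : ¬ t < l := by omega
      simp [this, (ih t).2 h2]

theorem cnt_none_eq_zero_iff (L : List Int) :
    (cnt none L = 0) ↔ L.Pairwise (· ≤ ·) := by
  cases L with
  | nil => simp [cnt]
  | cons t ts => simpa [cnt] using cnt_some_eq_zero_iff t ts

-- L equals its stable sort iff L is already non-decreasing.
theorem sorted_id_eq_self_iff (L : List Int) :
    (PySem.List.sorted L (fun x => x) false = L) ↔ L.Pairwise (· ≤ ·) := by
  constructor
  · intro h
    have := PySem.List.sorted_pairwise (xs := L) (key := fun x => x)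
    rwa [h] at this
  · intro h
    exact PySem.List.sorted_eq_self_of_pairwise L (fun x => x) h

theorem dedup_replicate (k : Nat) (s : String) :
    PySem.List.dedup (List.replicate k s) = if k = 0 then [] else [s] := by
  induction k with
  | zero => simp [PySem.List.dedup_eq_ofList, PySem.Set.ofList_nil]
  | succ j ih =>
    simp only [List.replicate_succ, PySem.List.dedup_eq_ofList, PySem.Set.ofList_cons] at *
    cases j with
    | zero => simp [PySem.Set.discard]
    | succ i =>
      simp only [if_neg (Nat.succ_ne_zero i)] at ih
      simp [ih, PySem.Set.discard]

-- ===== VERDICT (by name: the statement is the Claim_ definition above) =====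
theorem detect_out_of_order_candles_spec : Claim_equal_detect_out_of_order_candles := by
  intro candles _
  unfold Spec_detect_out_of_order_candles detect_out_of_order_candles detect_out_of_order_candles_alt
  by_cases hnil : candles = []
  · simp [hnil]
  · rw [if_neg hnil, if_neg hnil]
    simp only [foldA_filter]
    set L := candles.filterMap (fun row =>
        let ts : Int := (List.lookup "ts_ms" row).getD 0
        if ts > 0 then some ts else none) with hL
    rw [foldA_reasons]
    simp only [List.nil_append, List.length_replicate]
    rw [dedup_replicate]
    by_cases hz : cnt none L = 0
    · have hp := (cnt_none_eq_zero_iff L).1 hz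
      have hs : PySem.List.sorted L (fun x => x) false = L := (sorted_id_eq_self_iff L).2 hp
      simp [hz, hs]
    · have hs : ¬ PySem.List.sorted L (fun x => x) false = L := by
        intro hc
        exact hz ((cnt_none_eq_zero_iff L).2 ((sorted_id_eq_self_iff L).1 hc))
      have hs' : ¬ L = PySem.List.sorted L (fun x => x) false := fun hc => hs hc.symm
      simp [hz, hs']
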